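-- pv_equiv track=rewrite | github.com/mar480/cake | backend/search/index_builder.py | _extract_label_texts
-- ===== SOURCE A (Python) =====
-- def _extract_label_texts(entry: dict) -> tuple[str, list[str]]:
--     labels = entry.get("labels") or []
--     preferred_en = ""
--     preferred_fallback = ""
--     all_labels: list[str] = []
--
--     for label in labels:
--         if not isinstance(label, dict):
--             continue
--
--         text = (label.get("label_text") or "").strip()
--         if not text:
--             continue
--
--         all_labels.append(text)
--         label_type = (label.get("type") or "").strip().lower()
--         label_lang = (label.get("lang") or "").strip().lower()
--
--         if label_type == "standard label":
--             if label_lang == "en" and not preferred_en: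
--                 preferred_en = text
--             elif not preferred_fallback:
--                 preferred_fallback = text
--
--     if preferred_en:
--         return preferred_en, all_labels
--     if preferred_fallback:
--         return preferred_fallback, all_labels
--     return (all_labels[0] if all_labels else ""), all_labels
-- ===== SOURCE B (Python) =====
-- def _extract_label_texts(entry: dict) -> tuple[str, list[str]]:
--     labels = entry.get("labels") or []
--     valid = [
--         ((label.get("label_text") or "").strip(),
--          (label.get("type") or "").strip().lower(),
--          (label.get("lang") or "").strip().lower())
--         for label in labels
--         if isinstance(label, dict) and (label.get("label_text") or "").strip()
--     ]
--     all_labels = [t for t, _, _ in valid]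
--     preferred_en = next((t for t, ty, lg in valid if ty == "standard label" and lg == "en"), "")
--     preferred_fallback = next((t for t, ty, _ in valid if ty == "standard label"), "")
--     if preferred_en:
--         return preferred_en, all_labels
--     if preferred_fallback:
--         return preferred_fallback, all_labels
--     return (all_labels[0] if all_labels else ""), all_labels
-- ===== Notes on version B (the rewrite author's own statement) =====
-- stated objective: alternative
-- what changed: Replaces A's single pass that threads preferred_en/preferred_fallback state through an elif chain with one filtered list of (text,type,lang) tuples plus three independent scans (two next()-searches and a projection), relying on the fact that a fallback only matters when no English standard label exists.
import Mathlib
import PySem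

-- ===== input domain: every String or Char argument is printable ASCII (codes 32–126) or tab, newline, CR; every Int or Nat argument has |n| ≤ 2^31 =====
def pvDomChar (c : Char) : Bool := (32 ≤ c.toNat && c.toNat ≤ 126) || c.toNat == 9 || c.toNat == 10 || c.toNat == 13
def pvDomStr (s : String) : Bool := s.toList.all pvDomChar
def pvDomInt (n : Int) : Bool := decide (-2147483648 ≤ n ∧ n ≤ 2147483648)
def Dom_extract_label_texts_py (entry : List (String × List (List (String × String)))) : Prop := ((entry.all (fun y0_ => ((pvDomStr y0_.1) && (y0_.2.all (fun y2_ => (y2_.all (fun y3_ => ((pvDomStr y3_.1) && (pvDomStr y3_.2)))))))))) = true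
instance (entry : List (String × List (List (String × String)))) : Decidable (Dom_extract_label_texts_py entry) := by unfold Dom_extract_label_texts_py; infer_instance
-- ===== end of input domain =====

-- ===== PORT A =====
-- B is a different decomposition: one filtered index list plus three independent scans,
-- instead of A's single accumulating pass; objective "alternative", same cost.
def extract_label_texts_py (entry : List (String × List (List (String × String)))) : String × List String :=
  let labels := (entry.lookup "labels").getD []
  let st := labels.foldl
    (fun (st : String × String × List String) label =>
      let pe := st.1; let pf := st.2.1; let al := st.2.2
      let text := PySem.Str.strip ((label.lookup "label_text").getD "")
      if text = "" then (pe, pf, al)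
      else
        let al' := al ++ [text]
        let ty := PySem.Str.lower (PySem.Str.strip ((label.lookup "type").getD ""))
        let lg := PySem.Str.lower (PySem.Str.strip ((label.lookup "lang").getD ""))
        if ty = "standard label" then
          if lg = "en" ∧ pe = "" then (text, pf, al')
          else if pf = "" then (pe, text, al')
          else (pe, pf, al')
        else (pe, pf, al')) ("", "", [])
  if st.1 ≠ "" then (st.1, st.2.2)
  else if st.2.1 ≠ "" then (st.2.1, st.2.2)
  else (st.2.2.headD "", st.2.2)

-- ===== PORT B =====
def extract_label_texts_py_alt (entry : List (String × List (List (String × String)))) : String × List String :=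
  let labels := (entry.lookup "labels").getD []
  let valid := labels.filterMap (fun label =>
    let text := PySem.Str.strip ((label.lookup "label_text").getD "")
    if text = "" then none
    else some (text,
               PySem.Str.lower (PySem.Str.strip ((label.lookup "type").getD "")),
               PySem.Str.lower (PySem.Str.strip ((label.lookup "lang").getD ""))))
  let all_labels := valid.map (·.1)
  let preferred_en := ((valid.find? (fun t => t.2.1 = "standard label" ∧ t.2.2 = "en")).map (·.1)).getD ""
  let preferred_fallback := ((valid.find? (fun t => t.2.1 = "standard label")).map (·.1)).getD ""
  if preferred_en ≠ "" then (preferred_en, all_labels)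
  else if preferred_fallback ≠ "" then (preferred_fallback, all_labels)
  else (all_labels.headD "", all_labels)

-- ===== PRECONDITION & SPEC =====
def Spec_extract_label_texts_py (entry : List (String × List (List (String × String)))) (out : String × List String) : Prop := out = extract_label_texts_py_alt entry
instance (entry : List (String × List (List (String × String)))) (out : String × List String) : Decidable (Spec_extract_label_texts_py entry out) := by unfold Spec_extract_label_texts_py; infer_instance

-- ===== CLAIM (what is proved, stated in full; the proofs are below) =====
def Claim_equal_extract_label_texts_py : Prop := ∀ (entry : List (String × List (List (String × String)))), Dom_extract_label_texts_py entry → Spec_extract_label_texts_py entry (extract_label_texts_py entry)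

-- ===== LEMMAS AND PROOFS =====

-- proof-only helpers: the extraction of one label and A's loop step
def pvLab (label : List (String × String)) : Option (String × String × String) :=
  let text := PySem.Str.strip ((label.lookup "label_text").getD "")
  if text = "" then none
  else some (text,
             PySem.Str.lower (PySem.Str.strip ((label.lookup "type").getD "")),
             PySem.Str.lower (PySem.Str.strip ((label.lookup "lang").getD "")))

def pvStep (st : String × String × List String) (label : List (String × String)) : String × String × List String :=
  let pe := st.1; let pf := st.2.1; let al := st.2.2
  let text := PySem.Str.strip ((label.lookup "label_text").getD "")
  if text = "" then (pe, pf, al)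
  else
    let al' := al ++ [text]
    let ty := PySem.Str.lower (PySem.Str.strip ((label.lookup "type").getD ""))
    let lg := PySem.Str.lower (PySem.Str.strip ((label.lookup "lang").getD ""))
    if ty = "standard label" then
      if lg = "en" ∧ pe = "" then (text, pf, al')
      else if pf = "" then (pe, text, al')
      else (pe, pf, al')
    else (pe, pf, al')

def pvTexts (labels : List (List (String × String))) : List String :=
  (labels.filterMap pvLab).map (·.1)

def pvStd (labels : List (List (String × String))) : String :=
  ((((labels.filterMap pvLab).find? (fun t => t.2.1 = "standard label")).map (·.1)).getD "")

def pvEn (labels : List (List (String × String))) : Option (String × String × String) :=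
  (labels.filterMap pvLab).find? (fun t => t.2.1 = "standard label" ∧ t.2.2 = "en")

-- when pe is already set the en-branch never fires again
lemma pvFold_pe_ne : ∀ (labels : List (List (String × String))) (pe pf : String) (al : List String),
    pe ≠ "" →
    labels.foldl pvStep (pe, pf, al) =
      (pe, (if pf = "" then pvStd labels else pf), al ++ pvTexts labels) := by
  intro labels
  induction labels with
  | nil =>
    intro pe pf al h
    rcases eq_or_ne pf "" with hpf | hpf <;> simp [pvTexts, pvStd, pvLab, hpf]
  | cons l ls ih =>
    intro pe pf al h
    simp only [List.foldl_cons]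
    by_cases ht : PySem.Str.strip ((l.lookup "label_text").getD "") = ""
    · rw [show pvStep (pe, pf, al) l = (pe, pf, al) by simp [pvStep, ht]]
      rw [ih _ _ _ h]
      simp [pvTexts, pvStd, pvLab, List.filterMap_cons, ht]
    · by_cases hty : PySem.Str.lower (PySem.Str.strip ((l.lookup "type").getD "")) = "standard label"
      · have hen : ¬ (PySem.Str.lower (PySem.Str.strip ((l.lookup "lang").getD "")) = "en" ∧ pe = "") := by
          intro ⟨_, hpe⟩; exact h hpe
        by_cases hpf : pf = ""
        · rw [show pvStep (pe, pf, al) l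
              = (pe, PySem.Str.strip ((l.lookup "label_text").getD ""),
                 al ++ [PySem.Str.strip ((l.lookup "label_text").getD "")]) by
            simp [pvStep, ht, hty, hen, hpf]]
          rw [ih _ _ _ h]
          simp [pvTexts, pvStd, pvLab, List.filterMap_cons, ht, hty, hpf, List.find?_cons]
        · rw [show pvStep (pe, pf, al) l
              = (pe, pf, al ++ [PySem.Str.strip ((l.lookup "label_text").getD "")]) by
            simp [pvStep, ht, hty, hen, hpf]]
          rw [ih _ _ _ h]
          simp [pvTexts, pvLab, List.filterMap_cons, ht, hpf]
      · rw [show pvStep (pe, pf, al) l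
            = (pe, pf, al ++ [PySem.Str.strip ((l.lookup "label_text").getD "")]) by
          simp [pvStep, ht, hty]]
        rw [ih _ _ _ h]
        simp [pvTexts, pvStd, pvLab, List.filterMap_cons, ht, hty, List.find?_cons]

-- component characterisations of A's fold
lemma pvStep_al (st : String × String × List String) (l : List (String × String)) :
    (pvStep st l).2.2 = st.2.2 ++ ((pvLab l).toList.map (·.1)) := by
  simp only [pvStep, pvLab]
  split_ifs <;> simp

lemma pvTexts_cons (l : List (String × String)) (ls : List (List (String × String))) :
    pvTexts (l :: ls) = ((pvLab l).toList.map (·.1)) ++ pvTexts ls := by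
  simp only [pvTexts, List.filterMap_cons]
  cases pvLab l <;> simp

lemma pvFold_al : ∀ (labels : List (List (String × String))) (st : String × String × List String),
    (labels.foldl pvStep st).2.2 = st.2.2 ++ pvTexts labels := by
  intro labels
  induction labels with
  | nil => intro st; simp [pvTexts]
  | cons l ls ih =>
    intro st
    simp only [List.foldl_cons]
    rw [ih, pvStep_al, pvTexts_cons, List.append_assoc]

lemma pvFold_fst : ∀ (labels : List (List (String × String))) (pf : String) (al : List String),
    (labels.foldl pvStep ("", pf, al)).1 = (((pvEn labels).map (·.1)).getD "") := by
  intro labels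
  induction labels with
  | nil => intro pf al; simp [pvEn]
  | cons l ls ih =>
    intro pf al
    simp only [List.foldl_cons]
    by_cases ht : PySem.Str.strip ((l.lookup "label_text").getD "") = ""
    · rw [show pvStep ("", pf, al) l = ("", pf, al) by simp [pvStep, ht]]
      rw [ih]
      simp [pvEn, pvLab, List.filterMap_cons, ht]
    · by_cases hty : PySem.Str.lower (PySem.Str.strip ((l.lookup "type").getD "")) = "standard label"
      · by_cases hlg : PySem.Str.lower (PySem.Str.strip ((l.lookup "lang").getD "")) = "en"
        · rw [show pvStep ("", pf, al) l
              = (PySem.Str.strip ((l.lookup "label_text").getD ""), pf,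
                 al ++ [PySem.Str.strip ((l.lookup "label_text").getD "")]) by
            simp [pvStep, ht, hty, hlg]]
          rw [pvFold_pe_ne ls _ _ _ ht]
          simp [pvEn, pvLab, List.filterMap_cons, ht, hty, hlg, List.find?_cons]
        · have hEn : pvEn (l :: ls) = pvEn ls := by
            simp [pvEn, pvLab, List.filterMap_cons, ht, hlg, List.find?_cons]
          rw [hEn]
          by_cases hpf : pf = ""
          · rw [show pvStep ("", pf, al) l
                = ("", PySem.Str.strip ((l.lookup "label_text").getD ""),
                   al ++ [PySem.Str.strip ((l.lookup "label_text").getD "")]) by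
              simp [pvStep, ht, hty, hlg, hpf]]
            exact ih _ _
          · rw [show pvStep ("", pf, al) l
                = ("", pf, al ++ [PySem.Str.strip ((l.lookup "label_text").getD "")]) by
              simp [pvStep, ht, hty, hlg, hpf]]
            exact ih _ _
      · have hEn : pvEn (l :: ls) = pvEn ls := by
          simp [pvEn, pvLab, List.filterMap_cons, ht, hty, List.find?_cons]
        rw [hEn]
        rw [show pvStep ("", pf, al) l
            = ("", pf, al ++ [PySem.Str.strip ((l.lookup "label_text").getD "")]) by
          simp [pvStep, ht, hty]]
        exact ih _ _

lemma pvFold_pf : ∀ (labels : List (List (String × String))) (pf : String) (al : List String),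
    pvEn labels = none →
    (labels.foldl pvStep ("", pf, al)).2.1 = if pf = "" then pvStd labels else pf := by
  intro labels
  induction labels with
  | nil => intro pf al _; simp [pvStd]
  | cons l ls ih =>
    intro pf al hEn
    simp only [List.foldl_cons]
    by_cases ht : PySem.Str.strip ((l.lookup "label_text").getD "") = ""
    · rw [show pvStep ("", pf, al) l = ("", pf, al) by simp [pvStep, ht]]
      rw [ih _ _ (by simpa [pvEn, pvLab, List.filterMap_cons, ht] using hEn)]
      simp [pvStd, pvLab, List.filterMap_cons, ht]
    · by_cases hty : PySem.Str.lower (PySem.Str.strip ((l.lookup "type").getD "")) = "standard label"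
      · have hlg : ¬ PySem.Str.lower (PySem.Str.strip ((l.lookup "lang").getD "")) = "en" := by
          intro hlg
          simp [pvEn, pvLab, List.filterMap_cons, ht, hty, hlg, List.find?_cons] at hEn
        have hEn' : pvEn ls = none := by
          simpa [pvEn, pvLab, List.filterMap_cons, ht, hlg, List.find?_cons] using hEn
        by_cases hpf : pf = ""
        · rw [show pvStep ("", pf, al) l
              = ("", PySem.Str.strip ((l.lookup "label_text").getD ""),
                 al ++ [PySem.Str.strip ((l.lookup "label_text").getD "")]) by
            simp [pvStep, ht, hty, hlg, hpf]]
          rw [ih _ _ hEn']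
          simp [pvStd, pvLab, List.filterMap_cons, ht, hty, hpf, List.find?_cons]
        · rw [show pvStep ("", pf, al) l
              = ("", pf, al ++ [PySem.Str.strip ((l.lookup "label_text").getD "")]) by
            simp [pvStep, ht, hty, hlg, hpf]]
          rw [ih _ _ hEn']
          simp [hpf]
      · have hEn' : pvEn ls = none := by
          simpa [pvEn, pvLab, List.filterMap_cons, ht, hty, List.find?_cons] using hEn
        rw [show pvStep ("", pf, al) l
            = ("", pf, al ++ [PySem.Str.strip ((l.lookup "label_text").getD "")]) by
          simp [pvStep, ht, hty]]
        rw [ih _ _ hEn']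
        simp [pvStd, pvLab, List.filterMap_cons, ht, hty, List.find?_cons]

lemma pvEn_fst_ne (labels : List (List (String × String))) (t : String × String × String)
    (h : pvEn labels = some t) : t.1 ≠ "" := by
  have hm : t ∈ labels.filterMap pvLab := List.mem_of_find?_eq_some h
  obtain ⟨l, _, hl⟩ := List.mem_filterMap.mp hm
  simp only [pvLab] at hl
  split_ifs at hl with ht
  obtain rfl := Option.some.inj hl
  exact ht

-- the two ports, written through the proof helpers (definitionally equal)
lemma portA_eq (entry : List (String × List (List (String × String)))) :
    extract_label_texts_py entry =
      (let labels := (entry.lookup "labels").getD []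
       let st := labels.foldl pvStep ("", "", [])
       if st.1 ≠ "" then (st.1, st.2.2)
       else if st.2.1 ≠ "" then (st.2.1, st.2.2)
       else (st.2.2.headD "", st.2.2)) := rfl

lemma portB_eq (entry : List (String × List (List (String × String)))) :
    extract_label_texts_py_alt entry =
      (let labels := (entry.lookup "labels").getD []
       let pe := ((pvEn labels).map (·.1)).getD ""
       if pe ≠ "" then (pe, pvTexts labels)
       else if pvStd labels ≠ "" then (pvStd labels, pvTexts labels)
       else ((pvTexts labels).headD "", pvTexts labels)) := rfl

-- ===== VERDICT (by name: the statement is the Claim_ definition above) =====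
theorem extract_label_texts_py_spec : Claim_equal_extract_label_texts_py := by
  intro entry _
  unfold Spec_extract_label_texts_py
  rw [portA_eq, portB_eq]
  simp only []
  set labels := (entry.lookup "labels").getD [] with hl
  have hfst := pvFold_fst labels "" []
  have hal := pvFold_al labels ("", "", [])
  rcases hEn : pvEn labels with _ | t
  · have hpf := pvFold_pf labels "" [] hEn
    simp [hEn] at hfst
    simp only [hfst, hal, hpf, hEn]
    simp
  · simp [hEn] at hfst
    have hne := pvEn_fst_ne labels t hEn
    simp only [hfst, hal, hEn]
    simp [hne]
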